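-- pv_equiv track=rewrite | github.com/akirar0n/Curso-IA | IA/IA/aula1/aula03.py | gerar_estados
-- ===== SOURCE A (Python) =====
-- from itertools import product
--
-- professores = ["P1", "P2"]
--
-- salas = ["Sala1", "Sala2"]
--
-- horarios = ["8h", "10h"]
--
-- def valido(estado):
--     ocupacao = {}
--
--     for professor, (sala, horario) in estado.items():
--         if (sala, horario) in ocupacao:
--             return False
--         ocupacao[(sala, horario)] = professor
--
--     return True
--
-- def gerar_estados(estado):
--     novos_estados = []
--
--     # Próximo professor a ser alocado
--     nao_alocados = [p for p in professores if p not in estado]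
--
--     if not nao_alocados:
--         return []
--
--     professor = nao_alocados[0]
--
--     for sala, horario in product(salas, horarios):
--         novo_estado = estado.copy()
--         novo_estado[professor] = (sala, horario)
--
--         if valido(novo_estado):
--             novos_estados.append(novo_estado)
--
--     return novos_estados
-- ===== SOURCE B (Python) =====
-- from itertools import product
--
-- professores = ["P1", "P2"]
--
-- salas = ["Sala1", "Sala2"]
--
-- horarios = ["8h", "10h"]
--
-- def gerar_estados(estado):
--     # Occupied (sala, horario) pairs of the input, computed once; a clash in the
--     # input itself means no successor can be valid, so return [] immediately.
--     ocupados = set()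
--     for par in estado.values():
--         if par in ocupados:
--             return []
--         ocupados.add(par)
--
--     professor = next((p for p in professores if p not in estado), None)
--     if professor is None:
--         return []
--
--     return [{**estado, professor: par}
--             for par in product(salas, horarios) if par not in ocupados]
-- ===== Notes on version B (the rewrite author's own statement) =====
-- stated objective: simpler
-- what changed: B computes the occupied (sala, horario) set of the input once (returning [] immediately on a clash), picks the first free professor with next(), and produces the successors as a single filtered comprehension over the candidate pairs, instead of A's accumulator loop that re-validates each extended state with valido().
import Mathlib
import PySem

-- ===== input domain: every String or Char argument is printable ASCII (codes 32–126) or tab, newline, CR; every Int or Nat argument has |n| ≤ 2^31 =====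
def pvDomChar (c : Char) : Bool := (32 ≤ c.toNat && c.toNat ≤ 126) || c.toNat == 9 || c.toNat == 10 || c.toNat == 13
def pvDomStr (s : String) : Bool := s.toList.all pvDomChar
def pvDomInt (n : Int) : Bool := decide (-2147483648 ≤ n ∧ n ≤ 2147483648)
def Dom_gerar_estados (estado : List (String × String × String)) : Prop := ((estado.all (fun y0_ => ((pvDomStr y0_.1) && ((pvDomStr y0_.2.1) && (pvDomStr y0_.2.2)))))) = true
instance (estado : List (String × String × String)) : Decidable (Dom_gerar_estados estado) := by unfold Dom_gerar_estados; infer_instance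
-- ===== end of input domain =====

-- ===== PORT A =====
-- B builds the occupied (sala, horario) set of the input once and produces the
-- successors as a filtered comprehension, instead of A's per-candidate valido()
-- re-scan of each extended state; objective: simpler (same results).
-- 'estado' is a Python dict, ported as an association list in insertion order.
def pvProfessores : List String := ["P1", "P2"]
def pvSalas : List String := ["Sala1", "Sala2"]
def pvHorarios : List String := ["8h", "10h"]
-- itertools.product(salas, horarios) in order
def pvProduct : List (String × String) := pvSalas.flatMap (fun s => pvHorarios.map (fun h => (s, h)))

-- valido's 'for professor, (sala, horario) in estado.items()' loop, early return False
def validoLoop (oc : PySem.Dict (String × String) String) : List (String × String × String) → Bool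
  | [] => true
  | (professor, sh) :: rest =>
    if oc.contains sh then false else validoLoop (oc.insert sh professor) rest

def valido (estado : List (String × String × String)) : Bool :=
  validoLoop PySem.Dict.empty estado

def gerar_estados (estado : List (String × String × String)) : List (List (String × String × String)) :=
  let nao_alocados := pvProfessores.filter (fun p => !((PySem.Dict.mk estado).contains p))
  match nao_alocados with
  | [] => []
  | professor :: _ =>
    pvProduct.foldl (fun novos_estados sh =>
      let novo_estado := ((PySem.Dict.mk estado).insert professor sh).items
      if valido novo_estado then novos_estados ++ [novo_estado] else novos_estados) []

-- ===== PORT B =====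
-- the 'for par in estado.values()' loop growing the occupied set, early return on a clash
def occSet : List (String × String × String) → PySem.Set (String × String) → Option (PySem.Set (String × String))
  | [], acc => some acc
  | (_, par) :: rest, acc =>
    if par ∈ acc then none else occSet rest (PySem.Set.add acc par)

def gerar_estados_alt (estado : List (String × String × String)) : List (List (String × String × String)) :=
  match occSet estado PySem.Set.empty with
  | none => []
  | some ocupados =>
    match pvProfessores.find? (fun p => !((PySem.Dict.mk estado).contains p)) with
    | none => []
    | some professor =>
      (pvProduct.filter (fun par => !(par ∈ ocupados))).map
        (fun par => ((PySem.Dict.mk estado).insert professor par).items)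

-- ===== PRECONDITION & SPEC =====
def Spec_gerar_estados (estado : List (String × String × String)) (out : List (List (String × String × String))) : Prop := out = gerar_estados_alt estado
instance (estado : List (String × String × String)) (out : List (List (String × String × String))) : Decidable (Spec_gerar_estados estado out) := by unfold Spec_gerar_estados; infer_instance

-- ===== CLAIM (what is proved, stated in full; the proofs are below) =====
def Claim_equal_gerar_estados : Prop := ∀ (estado : List (String × String × String)), Dom_gerar_estados estado → Spec_gerar_estados estado (gerar_estados estado)

-- ===== LEMMAS AND PROOFS =====

-- validoLoop's dict-of-seen-pairs and occSet's set-of-seen-pairs see the same members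
theorem validoLoop_eq_isSome_occSet (l : List (String × String × String))
    (oc : PySem.Dict (String × String) String) (acc : PySem.Set (String × String))
    (h : ∀ sh, oc.contains sh = decide (sh ∈ acc)) :
    validoLoop oc l = (occSet l acc).isSome := by
  induction l generalizing oc acc with
  | nil => simp [validoLoop, occSet]
  | cons e rest ih =>
    obtain ⟨p, sh⟩ := e
    by_cases hm : sh ∈ acc
    · simp [validoLoop, occSet, h, hm]
    · rw [validoLoop, occSet]
      simp only [h, hm, decide_false, if_false, Bool.false_eq_true]
      refine ih _ _ (fun sh' => ?_)
      rw [PySem.Dict.contains_insert]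
      by_cases h1 : sh' = sh <;> simp [h1, h, PySem.Set.mem_add]

-- occSet over an appended tail
theorem occSet_append (l l' : List (String × String × String)) (acc : PySem.Set (String × String)) :
    occSet (l ++ l') acc = (occSet l acc).bind (fun res => occSet l' res) := by
  induction l generalizing acc with
  | nil => simp [occSet]
  | cons e rest ih =>
    obtain ⟨p, sh⟩ := e
    by_cases hm : sh ∈ acc <;> simp [occSet, hm, ih]

-- A's validity test of an extended state, phrased through B's occupied set
theorem valido_extend (estado : List (String × String × String)) (p : String) (sh : String × String) :
    valido (estado ++ [(p, sh)]) =
      (match occSet estado PySem.Set.empty with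
       | none => false
       | some occ => !(sh ∈ occ)) := by
  rw [valido, validoLoop_eq_isSome_occSet _ _ PySem.Set.empty
        (fun sh' => by simp [PySem.Set.empty]),
      occSet_append]
  cases h : occSet estado PySem.Set.empty with
  | none => simp
  | some occ => by_cases hm : sh ∈ occ <;> simp [occSet, hm]

-- next(...) = head of the filtered list
theorem find?_eq_head?_filter' {α : Type} (p : α → Bool) (l : List α) :
    l.find? p = (l.filter p).head? := by
  induction l with
  | nil => rfl
  | cons x xs ih =>
    rw [List.find?_cons, List.filter_cons]
    cases h : p x
    · simpa using ih
    · simp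

-- a fresh professor key is appended by dict insertion
theorem items_insert_fresh (estado : List (String × String × String)) (p : String)
    (hp : (PySem.Dict.mk estado).contains p = false) (sh : String × String) :
    ((PySem.Dict.mk estado).insert p sh).items = estado ++ [(p, sh)] := by
  rw [PySem.Dict.items_insert_of_not_contains _ _ hp]

-- ===== VERDICT (by name: the statement is the Claim_ definition above) =====
theorem gerar_estados_spec : Claim_equal_gerar_estados := by
  intro estado _
  unfold Spec_gerar_estados gerar_estados gerar_estados_alt
  rw [find?_eq_head?_filter']
  cases hf : pvProfessores.filter (fun p => !((PySem.Dict.mk estado).contains p)) with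
  | nil => cases occSet estado PySem.Set.empty <;> simp
  | cons professor hd =>
    have hp : (PySem.Dict.mk estado).contains professor = false := by
      have := List.mem_filter.mp (hf ▸ List.mem_cons_self)
      simpa using this.2
    have hv : ∀ sh, valido (((PySem.Dict.mk estado).insert professor sh).items) =
        (match occSet estado PySem.Set.empty with
         | none => false
         | some occ => !(sh ∈ occ)) := by
      intro sh; rw [items_insert_fresh estado professor hp sh, valido_extend]
    cases h : occSet estado PySem.Set.empty with
    | none =>
      simp only [h] at hv
      simp [hv]
    | some occ =>
      simp only [h] at hv
      simp only [List.head?_cons, hv, PySem.List.foldl_append_if]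
      simp
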